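-- pv_equiv track=rewrite | github.com/liskos/leletko | варианты 2025/егкр19/26.py | max_od
-- ===== SOURCE A (Python) =====
-- def max_od(a):
--     """функция находит максимальное количество через одну"""
--     a = sorted(a)
--     chet = [x for x in a if x % 2 == 0]
--     m = 1
--     k = 1
--     for i in range(1, len(chet)):
--         if chet[i] - 2 == chet[i-1]:
--             k += 1
--             m = max(m, k)
--         else:
--             k = 1
--     nechet = [x for x in a if x % 2 == 1]
--     k = 1
--     for i in range(1, len(nechet)):
--         if nechet[i] - 2 == nechet[i-1]:
--             k += 1
--             m = max(m, k)
--         else: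
--             k = 1
--     return m
-- ===== SOURCE B (Python) =====
-- def _upd(m, last, x):
--     """advance one parity track: extend the run if x continues it, else restart"""
--     if last is not None and x - 2 == last[0]:
--         k = last[1] + 1
--         if k > m:
--             m = k
--     else:
--         k = 1
--     return m, (x, k)
--
-- def max_od(a):
--     """функция находит максимальное количество через одну"""
--     m = 1
--     laste = None
--     lasto = None
--     for x in sorted(a):
--         if x % 2 == 0:
--             m, laste = _upd(m, laste, x)
--         else:
--             m, lasto = _upd(m, lasto, x)
--     return m
-- ===== Notes on version B (the rewrite author's own statement) =====
-- stated objective: alternative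
-- what changed: A sorts, builds two filtered parity lists and runs two separate index loops over them; B makes a single pass over the sorted list, maintaining one (last value, run length) tracker per parity, so no filtered copies and no index arithmetic.
import Mathlib
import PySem

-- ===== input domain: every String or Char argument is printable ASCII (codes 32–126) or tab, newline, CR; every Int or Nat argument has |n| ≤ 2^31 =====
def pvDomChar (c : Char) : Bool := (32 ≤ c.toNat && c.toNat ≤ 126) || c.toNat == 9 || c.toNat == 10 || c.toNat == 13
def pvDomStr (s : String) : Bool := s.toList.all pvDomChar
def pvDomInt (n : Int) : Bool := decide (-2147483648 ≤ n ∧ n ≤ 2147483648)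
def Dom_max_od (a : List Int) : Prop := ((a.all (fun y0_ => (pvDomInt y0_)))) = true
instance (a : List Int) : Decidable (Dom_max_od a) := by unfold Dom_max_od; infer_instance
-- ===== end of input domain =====

-- B fuses A's sort-filter-index-scan pipeline into a single pass over the sorted list
-- that tracks both parity runs at once (alternative decomposition, same result).


-- ===== PORT A =====
def max_od (a : List Int) : Int :=
  let a' := PySem.List.sorted a (fun x => x) false
  let chet := a'.filter (fun x => PySem.Int.mod x 2 == 0)
  let r1 := (PySem.List.pyRange 1 (PySem.List.len chet) 1).foldl
      (fun (mk : Int × Int) i =>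
        if PySem.List.pyGetD chet i 0 - 2 == PySem.List.pyGetD chet (i - 1) 0 then
          (max mk.1 (mk.2 + 1), mk.2 + 1)
        else (mk.1, 1)) (1, 1)
  let nechet := a'.filter (fun x => PySem.Int.mod x 2 == 1)
  let r2 := (PySem.List.pyRange 1 (PySem.List.len nechet) 1).foldl
      (fun (mk : Int × Int) i =>
        if PySem.List.pyGetD nechet i 0 - 2 == PySem.List.pyGetD nechet (i - 1) 0 then
          (max mk.1 (mk.2 + 1), mk.2 + 1)
        else (mk.1, 1)) (r1.1, 1)
  r2.1

-- ===== PORT B =====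
-- helper _upd of Source B: advance one parity track
def pvUpd (m : Int) (last : Option (Int × Int)) (x : Int) : Int × (Int × Int) :=
  match last with
  | some pk =>
    if x - 2 == pk.1 then
      let k := pk.2 + 1
      ((if k > m then k else m), (x, k))
    else (m, (x, 1))
  | none => (m, (x, 1))

def max_od_alt (a : List Int) : Int :=
  ((PySem.List.sorted a (fun x => x) false).foldl
    (fun (st : Int × Option (Int × Int) × Option (Int × Int)) y =>
      if PySem.Int.mod y 2 == 0 then
        let r := pvUpd st.1 st.2.1 y
        (r.1, some r.2, st.2.2)
      else
        let r := pvUpd st.1 st.2.2 y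
        (r.1, st.2.1, some r.2))
    (1, none, none)).1

-- ===== PRECONDITION & SPEC =====
def Spec_max_od (a : List Int) (out : Int) : Prop := out = max_od_alt a
instance (a : List Int) (out : Int) : Decidable (Spec_max_od a out) := by unfold Spec_max_od; infer_instance

-- ===== CLAIM (what is proved, stated in full; the proofs are below) =====
def Claim_equal_max_od : Prop := ∀ (a : List Int), Dom_max_od a → Spec_max_od a (max_od a)

-- ===== LEMMAS AND PROOFS =====

-- (m, prev, k): the run scan both programs perform on one parity class
def pvFold2 : List Int → Int × Int × Int → Int × Int × Int
  | [], s => s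
  | x :: t, (m, p, k) =>
      pvFold2 t (if x - 2 = p then (max m (k + 1), x, k + 1) else (m, x, 1))

-- B's single-parity fold (the track pvUpd maintains)
def pvFoldP (l : List Int) (st : Int × Option (Int × Int)) : Int × Option (Int × Int) :=
  l.foldl (fun st x => let r := pvUpd st.1 st.2 x; (r.1, some r.2)) st

-- the common value both programs compute on one parity class
def pvALoop (l : List Int) (m : Int) : Int :=
  match l with
  | [] => m
  | h :: t => (pvFold2 t (m, h, 1)).1

theorem pvIfMax (m k : Int) : (if k > m then k else m) = max m k := by
  split <;> omega

theorem pvFoldP_cons (x : Int) (l : List Int) (st : Int × Option (Int × Int)) :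
    pvFoldP (x :: l) st = pvFoldP l ((pvUpd st.1 st.2 x).1, some (pvUpd st.1 st.2 x).2) := rfl

theorem pvFold2_cons (x : Int) (t : List Int) (m p k : Int) :
    pvFold2 (x :: t) (m, p, k) =
      pvFold2 t (if x - 2 = p then (max m (k + 1), x, k + 1) else (m, x, 1)) := rfl

theorem pvUpd_some (m p k x : Int) :
    pvUpd m (some (p, k)) x =
      if x - 2 = p then (max m (k + 1), (x, k + 1)) else (m, (x, 1)) := by
  rw [show pvUpd m (some (p, k)) x =
      if x - 2 == p then ((if k + 1 > m then k + 1 else m), (x, k + 1)) else (m, (x, 1)) from rfl,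
    pvIfMax]
  by_cases h : x - 2 = p <;> simp [h]

theorem pvFoldP_some (t : List Int) (m p k : Int) :
    pvFoldP t (m, some (p, k)) =
      ((pvFold2 t (m, p, k)).1,
        some ((pvFold2 t (m, p, k)).2.1, (pvFold2 t (m, p, k)).2.2)) := by
  induction t generalizing m p k with
  | nil => rfl
  | cons x t ih =>
      rw [pvFoldP_cons, pvFold2_cons]
      by_cases h : x - 2 = p <;>
        simp only [pvUpd_some, h, if_pos, if_neg, not_false_iff] <;>
        exact ih _ _ _

theorem pvFoldP_snd (l : List Int) (m m' : Int) (le : Option (Int × Int)) :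
    (pvFoldP l (m, le)).2 = (pvFoldP l (m', le)).2 := by
  induction l generalizing m m' le with
  | nil => rfl
  | cons x l ih =>
      have h2 : (pvUpd m le x).2 = (pvUpd m' le x).2 := by
        cases le with
        | none => rfl
        | some pk => by_cases h : x - 2 = pk.1 <;> simp [pvUpd, h]
      rw [pvFoldP_cons, pvFoldP_cons]
      simp only [h2]
      exact ih _ _ _

theorem pvFoldP_fst_max (l : List Int) (le : Option (Int × Int)) (m c : Int) :
    (pvFoldP l (max m c, le)).1 = max (pvFoldP l (m, le)).1 c := by
  induction l generalizing le m with
  | nil => rfl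
  | cons x l ih =>
      rw [pvFoldP_cons, pvFoldP_cons]
      cases le with
      | none => exact ih _ _
      | some pk =>
          by_cases h : x - 2 = pk.1
          · simp only [show pvUpd (max m c) (some pk) x =
                (max (max m (pk.2 + 1)) c, (x, pk.2 + 1)) by
                  rw [show (pk : Int × Int) = (pk.1, pk.2) from rfl, pvUpd_some]
                  simp [h, max_right_comm],
              show pvUpd m (some pk) x = (max m (pk.2 + 1), (x, pk.2 + 1)) by
                  rw [show (pk : Int × Int) = (pk.1, pk.2) from rfl, pvUpd_some]
                  simp [h]]
            exact ih _ _
          · simp only [show pvUpd (max m c) (some pk) x = (max m c, (x, 1)) by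
                  rw [show (pk : Int × Int) = (pk.1, pk.2) from rfl, pvUpd_some]
                  simp [h],
              show pvUpd m (some pk) x = (m, (x, 1)) by
                  rw [show (pk : Int × Int) = (pk.1, pk.2) from rfl, pvUpd_some]
                  simp [h]]
            exact ih _ _

theorem pvL1 (l : List Int) (t pre : List Int) (h : Int) (m k : Int)
    (hl : l = pre ++ h :: t) :
    ((PySem.List.pyRange ((pre.length : Int) + 1) (PySem.List.len l) 1).foldl
      (fun (mk : Int × Int) i =>
        if PySem.List.pyGetD l i 0 - 2 == PySem.List.pyGetD l (i - 1) 0 then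
          (max mk.1 (mk.2 + 1), mk.2 + 1)
        else (mk.1, 1)) (m, k)) =
      ((pvFold2 t (m, h, k)).1, (pvFold2 t (m, h, k)).2.2) := by
  induction t generalizing pre h m k with
  | nil =>
      have hlen : PySem.List.len l = (pre.length : Int) + 1 := by
        simp [PySem.List.len_eq, hl]
      rw [hlen, PySem.List.pyRange_one_eq_nil (le_refl _)]
      rfl
  | cons x t ih =>
      have hlen : PySem.List.len l = (pre.length : Int) + 2 + t.length := by
        simp only [PySem.List.len_eq, hl, List.length_append, List.length_cons]
        push_cast
        ring
      have hlt : (pre.length : Int) + 1 < PySem.List.len l := by rw [hlen]; omega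
      rw [PySem.List.pyRange_one_cons hlt, List.foldl_cons]
      have g2 : PySem.List.pyGetD l ((pre.length : Int) + 1 - 1) 0 = h := by
        rw [show ((pre.length : Int) + 1 - 1) = (pre.length : Int) by ring,
          PySem.List.pyGetD_natCast, hl]
        simp [List.getD]
      have g1 : PySem.List.pyGetD l ((pre.length : Int) + 1) 0 = x := by
        rw [show ((pre.length : Int) + 1) = ((pre.length + 1 : Nat) : Int) by push_cast; ring,
          PySem.List.pyGetD_natCast, hl]
        simp [List.getD]
      rw [g1, g2, pvFold2_cons]
      have hpre : l = (pre ++ [h]) ++ x :: t := by simp [hl]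
      have hcast : ((pre ++ [h]).length : Int) + 1 = (pre.length : Int) + 1 + 1 := by
        simp only [List.length_append, List.length_cons, List.length_nil]
        push_cast
        ring
      by_cases hb : x - 2 = h
      · rw [if_pos (by simpa using hb), if_pos hb]
        have := ih (pre ++ [h]) x (max m (k + 1)) (k + 1) hpre
        rw [hcast] at this
        exact this
      · rw [if_neg (by simpa using hb), if_neg hb]
        have := ih (pre ++ [h]) x m 1 hpre
        rw [hcast] at this
        exact this

theorem pvLA (l : List Int) (m : Int) :
    ((PySem.List.pyRange 1 (PySem.List.len l) 1).foldl
      (fun (mk : Int × Int) i =>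
        if PySem.List.pyGetD l i 0 - 2 == PySem.List.pyGetD l (i - 1) 0 then
          (max mk.1 (mk.2 + 1), mk.2 + 1)
        else (mk.1, 1)) (m, 1)).1 = pvALoop l m := by
  cases l with
  | nil =>
      rw [show PySem.List.len ([] : List Int) = 0 by simp [PySem.List.len_eq],
        PySem.List.pyRange_one_eq_nil (by omega)]
      rfl
  | cons h t =>
      have := pvL1 (h :: t) t [] h m 1 rfl
      rw [show ((([] : List Int).length : Int) + 1) = 1 by simp] at this
      rw [this]
      rfl

theorem pvLB (l : List Int) (m : Int) :
    (pvFoldP l (m, none)).1 = pvALoop l m := by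
  cases l with
  | nil => rfl
  | cons h t =>
      rw [pvFoldP_cons]
      show (pvFoldP t (m, some (h, 1))).1 = _
      rw [pvFoldP_some]
      rfl

def pvBStep (st : Int × Option (Int × Int) × Option (Int × Int)) (y : Int) :
    Int × Option (Int × Int) × Option (Int × Int) :=
  if PySem.Int.mod y 2 == 0 then
    let r := pvUpd st.1 st.2.1 y
    (r.1, some r.2, st.2.2)
  else
    let r := pvUpd st.1 st.2.2 y
    (r.1, st.2.1, some r.2)

theorem pvBStep_even (m : Int) (le lo : Option (Int × Int)) (x : Int)
    (he : PySem.Int.mod x 2 = 0) :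
    pvBStep (m, le, lo) x = ((pvUpd m le x).1, some (pvUpd m le x).2, lo) := by
  have hb : (PySem.Int.mod x 2 == 0) = true := by simpa using he
  simp only [pvBStep, hb, if_true]

theorem pvBStep_odd (m : Int) (le lo : Option (Int × Int)) (x : Int)
    (he : ¬ PySem.Int.mod x 2 = 0) :
    pvBStep (m, le, lo) x = ((pvUpd m lo x).1, le, some (pvUpd m lo x).2) := by
  have hb : (PySem.Int.mod x 2 == 0) = false := by simpa using he
  simp only [pvBStep, hb, if_false, Bool.false_eq_true]

theorem pvFoldP_cons' (x : Int) (l : List Int) (m : Int) (le : Option (Int × Int)) :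
    pvFoldP (x :: l) (m, le) =
      pvFoldP l ((pvUpd m le x).1, some (pvUpd m le x).2) := rfl

theorem pvSplit (s : List Int) (m : Int) (le lo : Option (Int × Int)) :
    s.foldl pvBStep (m, le, lo) =
      ((pvFoldP (s.filter (fun x => PySem.Int.mod x 2 == 1))
          ((pvFoldP (s.filter (fun x => PySem.Int.mod x 2 == 0)) (m, le)).1, lo)).1,
        (pvFoldP (s.filter (fun x => PySem.Int.mod x 2 == 0)) (m, le)).2,
        (pvFoldP (s.filter (fun x => PySem.Int.mod x 2 == 1)) (m, lo)).2) := by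
  induction s generalizing m le lo with
  | nil => rfl
  | cons x s ih =>
      by_cases he : PySem.Int.mod x 2 = 0
      · have hb0 : (PySem.Int.mod x 2 == 0) = true := by simpa using he
        have hb1 : (PySem.Int.mod x 2 == 1) = false := by
          simp only [beq_eq_false_iff_ne, ne_eq]
          omega
        have hf0 : (x :: s).filter (fun x => PySem.Int.mod x 2 == 0) =
            x :: s.filter (fun x => PySem.Int.mod x 2 == 0) := by
          simp only [List.filter_cons, hb0, if_true]
        have hf1 : (x :: s).filter (fun x => PySem.Int.mod x 2 == 1) =
            s.filter (fun x => PySem.Int.mod x 2 == 1) := by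
          simp only [List.filter_cons, hb1, Bool.false_eq_true, if_false]
        rw [List.foldl_cons, pvBStep_even m le lo x he, ih, hf0, hf1, pvFoldP_cons',
          pvFoldP_snd (s.filter (fun x => PySem.Int.mod x 2 == 1)) m (pvUpd m le x).1 lo]
      · have ho : PySem.Int.mod x 2 = 1 := by
          rcases PySem.Int.mod_two_eq x with h | h <;> omega
        have hb0 : (PySem.Int.mod x 2 == 0) = false := by
          simp only [beq_eq_false_iff_ne, ne_eq]
          omega
        have hb1 : (PySem.Int.mod x 2 == 1) = true := by simpa using ho
        have hf0 : (x :: s).filter (fun x => PySem.Int.mod x 2 == 0) =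
            s.filter (fun x => PySem.Int.mod x 2 == 0) := by
          simp only [List.filter_cons, hb0, Bool.false_eq_true, if_false]
        have hf1 : (x :: s).filter (fun x => PySem.Int.mod x 2 == 1) =
            x :: s.filter (fun x => PySem.Int.mod x 2 == 1) := by
          simp only [List.filter_cons, hb1, if_true]
        rw [List.foldl_cons, pvBStep_odd m le lo x he, ih, hf0, hf1, pvFoldP_cons',
          pvFoldP_cons']
        simp only [Prod.mk.injEq]
        refine ⟨?_, pvFoldP_snd _ _ _ _, by trivial⟩
        cases lo with
        | none =>
            rw [show pvUpd m none x = (m, (x, 1)) from rfl,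
              show pvUpd (pvFoldP (s.filter (fun x => PySem.Int.mod x 2 == 0)) (m, le)).1
                  none x =
                ((pvFoldP (s.filter (fun x => PySem.Int.mod x 2 == 0)) (m, le)).1, (x, 1))
                from rfl]
        | some pk =>
            by_cases hx : x - 2 = pk.1
            · have hupd : ∀ mm : Int,
                  pvUpd mm (some pk) x = (max mm (pk.2 + 1), (x, pk.2 + 1)) := fun mm => by
                rw [show (pk : Int × Int) = (pk.1, pk.2) from rfl, pvUpd_some]
                simp [hx]
              simp only [hupd]
              rw [pvFoldP_fst_max]
            · have hupd : ∀ mm : Int, pvUpd mm (some pk) x = (mm, (x, 1)) := fun mm => by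
                rw [show (pk : Int × Int) = (pk.1, pk.2) from rfl, pvUpd_some]
                simp [hx]
              simp only [hupd]

-- ===== VERDICT (by name: the statement is the Claim_ definition above) =====
theorem max_od_spec : Claim_equal_max_od := by
  intro a _
  unfold Spec_max_od max_od max_od_alt
  show _ = (List.foldl pvBStep (1, none, none) (PySem.List.sorted a (fun x => x) false)).1
  rw [pvSplit]
  simp only [pvLA, pvLB]
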